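-- pv_equiv track=rewrite | github.com/tacticalowlman/advent_of_code_2022 | task8/main.py | check_h
-- ===== SOURCE A (Python) =====
-- def check_h(mx):
--     trs_hdn_mx=[]
--     ct0=0
--     for k in mx:
--         ct = 0
--         trs_hdn_ln = []
--         max_h = 0
--         for i in k:
--             if ct>0 and i<=max_h:
--                 trs_hdn_ln.append('h')
--             else:
--                 trs_hdn_ln.append('v')
--             if i>max_h:
--                 max_h=i
--             ct+=1
--         trs_hdn_mx.append(trs_hdn_ln)
--         ct0+=1
--     return trs_hdn_mx
-- ===== SOURCE B (Python) =====
-- def check_h(mx):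
--     def label(row):
--         pm = [0]
--         for x in row:
--             pm.append(pm[-1] if pm[-1] >= x else x)
--         if not row:
--             return []
--         return ['v'] + ['h' if x <= m else 'v' for x, m in zip(row[1:], pm[1:])]
--     return [label(row) for row in mx]
-- ===== Notes on version B (the rewrite author's own statement) =====
-- stated objective: idiomatic
-- what changed: B separates the work into two passes per row: it first builds a prefix-maximum table seeded with 0, then labels the tail by zipping it with the shifted table (head always 'v'), instead of threading max_h and a counter through one appending loop.
import Mathlib
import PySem

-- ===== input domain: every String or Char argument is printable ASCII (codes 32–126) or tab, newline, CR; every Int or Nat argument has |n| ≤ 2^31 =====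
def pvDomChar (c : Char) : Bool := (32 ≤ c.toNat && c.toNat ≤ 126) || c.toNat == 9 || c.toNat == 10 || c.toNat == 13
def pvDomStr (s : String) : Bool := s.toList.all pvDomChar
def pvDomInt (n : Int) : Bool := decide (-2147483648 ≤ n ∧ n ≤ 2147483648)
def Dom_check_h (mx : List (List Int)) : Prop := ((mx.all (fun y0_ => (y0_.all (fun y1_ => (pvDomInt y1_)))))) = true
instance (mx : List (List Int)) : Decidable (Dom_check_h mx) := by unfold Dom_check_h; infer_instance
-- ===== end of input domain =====

-- B rebuilds each row's labels from a prefix-maximum table built in a separate pass (idiomatic two-pass decomposition); same results as A.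

-- ===== PORT A =====
-- inner loop state: (ct, trs_hdn_ln, max_h)
def check_h_stepA (st : Int × List String × Int) (i : Int) : Int × List String × Int :=
  let ln := if st.1 > 0 ∧ i ≤ st.2.2 then st.2.1 ++ ["h"] else st.2.1 ++ ["v"]
  let mh := if i > st.2.2 then i else st.2.2
  (st.1 + 1, ln, mh)

def check_h (mx : List (List Int)) : List (List String) :=
  (mx.foldl
    (fun (acc : List (List String) × Int) k =>
      let inner := k.foldl check_h_stepA (0, [], 0)
      (acc.1 ++ [inner.2.1], acc.2 + 1))
    ([], 0)).1

-- ===== PORT B =====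
-- prefix-max table pm: state (pm, last) where last tracks pm[-1]
def check_h_pmStep (st : List Int × Int) (x : Int) : List Int × Int :=
  let nxt := if st.2 ≥ x then st.2 else x
  (st.1 ++ [nxt], nxt)

def check_h_label (row : List Int) : List String :=
  let pm := (row.foldl check_h_pmStep ([0], 0)).1
  match row with
  | [] => []
  | _ :: rest =>
      "v" :: (rest.zip (pm.drop 1)).map (fun p => if p.1 ≤ p.2 then "h" else "v")

def check_h_alt (mx : List (List Int)) : List (List String) :=
  mx.map check_h_label

-- ===== PRECONDITION & SPEC =====
def Spec_check_h (mx : List (List Int)) (out : List (List String)) : Prop := out = check_h_alt mx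
instance (mx : List (List Int)) (out : List (List String)) : Decidable (Spec_check_h mx out) := by unfold Spec_check_h; infer_instance

-- ===== CLAIM (what is proved, stated in full; the proofs are below) =====
def Claim_equal_check_h : Prop := ∀ (mx : List (List Int)), Dom_check_h mx → Spec_check_h mx (check_h mx)

-- ===== LEMMAS AND PROOFS =====

-- reference row labeling: element gets 'h' iff ≤ running max m
def rowSpec (m : Int) : List Int → List String
  | [] => []
  | x :: xs => (if x ≤ m then "h" else "v") :: rowSpec (if x > m then x else m) xs

-- running prefix maxima AFTER each element, starting from m
def pms (m : Int) : List Int → List Int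
  | [] => []
  | x :: xs =>
      let n := if m ≥ x then m else x
      n :: pms n xs

theorem foldA_eq (xs : List Int) : ∀ (ct : Int) (ln : List String) (m : Int), ct ≥ 1 →
    (xs.foldl check_h_stepA (ct, ln, m)).2.1 = ln ++ rowSpec m xs := by
  induction xs with
  | nil => intro ct ln m _; simp [rowSpec]
  | cons x t ih =>
      intro ct ln m hct
      simp only [List.foldl_cons, check_h_stepA, rowSpec]
      have hpos : ct > 0 := by omega
      by_cases hx : x ≤ m
      · simp only [hpos, hx, and_self, if_true]
        rw [ih (ct + 1) _ _ (by omega)]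
        simp [List.append_assoc]
      · simp only [hx, and_false, if_false]
        rw [ih (ct + 1) _ _ (by omega)]
        have hgt : x > m := by omega
        simp [hgt, List.append_assoc]

theorem foldPM_eq (xs : List Int) : ∀ (pre : List Int) (m : Int),
    (xs.foldl check_h_pmStep (pre, m)).1 = pre ++ pms m xs := by
  induction xs with
  | nil => intro pre m; simp [pms]
  | cons x t ih =>
      intro pre m
      simp only [List.foldl_cons, check_h_pmStep, pms]
      rw [ih]
      simp [List.append_assoc]

theorem zip_pms_eq (xs : List Int) : ∀ (m : Int),
    (xs.zip (m :: pms m xs)).map (fun p => if p.1 ≤ p.2 then "h" else "v") = rowSpec m xs := by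
  induction xs with
  | nil => intro m; simp [rowSpec]
  | cons x t ih =>
      intro m
      simp only [pms, List.zip_cons_cons, List.map_cons, rowSpec]
      congr 1
      · rw [show (if m ≥ x then m else x) = (if x > m then x else m) by split_ifs <;> omega] at *
        exact ih _

theorem row_eq (k : List Int) :
    (k.foldl check_h_stepA (0, [], 0)).2.1 = check_h_label k := by
  cases k with
  | nil => simp [check_h_label]
  | cons x t =>
      have hc : ¬ ((0:Int) > 0 ∧ x ≤ (0:Int)) := by omega
      simp only [check_h_label, List.foldl_cons, check_h_stepA, check_h_pmStep, hc, if_false,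
        List.nil_append, zero_add, ge_iff_le]
      rw [foldA_eq t 1 ["v"] _ (by omega), foldPM_eq]
      simp only [List.cons_append, List.nil_append, List.drop_succ_cons, List.drop_zero]
      rw [show (if x > (0:Int) then x else 0) = (if x ≤ (0:Int) then 0 else x) by split_ifs <;> omega]
      rw [zip_pms_eq]

theorem outer_eq (mx : List (List Int)) : ∀ (acc : List (List String)) (c : Int),
    (mx.foldl
      (fun (acc : List (List String) × Int) k =>
        let inner := k.foldl check_h_stepA (0, [], 0)
        (acc.1 ++ [inner.2.1], acc.2 + 1))
      (acc, c)).1 = acc ++ mx.map check_h_label := by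
  induction mx with
  | nil => intro acc c; simp
  | cons k t ih =>
      intro acc c
      simp only [List.foldl_cons, List.map_cons]
      rw [ih]
      rw [row_eq k]
      simp [List.append_assoc]

-- ===== VERDICT (by name: the statement is the Claim_ definition above) =====
theorem check_h_spec : Claim_equal_check_h := by
  intro mx _
  unfold Spec_check_h check_h check_h_alt
  rw [outer_eq]
  simp
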